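-- pv_equiv track=rewrite | github.com/Defalt-Meh/Sentinel-C | helpers.py | flags_from_spans
-- ===== SOURCE A (Python) =====
-- from typing import List, Tuple, Dict, Iterable, Sequence, Optional
--
-- Span = Tuple[int, int, str]  # (start, end, type)
--
-- FLAG_ORDER = ("has_email","has_card","has_phone","has_iban","has_jwt","has_api")
--
-- def flags_from_spans(spans: Sequence[Span]) -> Dict[str, int]:
--     f = {k: 0 for k in FLAG_ORDER}
--     for _, _, t in spans:
--         if   t == "email":       f["has_email"] = 1
--         elif t == "credit_card": f["has_card"]  = 1
--         elif t == "phone":       f["has_phone"] = 1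
--         elif t == "iban":        f["has_iban"]  = 1
--         elif t == "jwt":         f["has_jwt"]   = 1
--         elif t == "api_key":     f["has_api"]   = 1
--     return f
-- ===== SOURCE B (Python) =====
-- from typing import Tuple, Dict, Sequence
--
-- Span = Tuple[int, int, str]
--
-- FLAG_ORDER = ("has_email","has_card","has_phone","has_iban","has_jwt","has_api")
--
-- TYPE_FOR_FLAG = {
--     "has_email": "email",
--     "has_card":  "credit_card",
--     "has_phone": "phone",
--     "has_iban":  "iban",
--     "has_jwt":   "jwt",
--     "has_api":   "api_key",
-- }
--
-- def flags_from_spans(spans: Sequence[Span]) -> Dict[str, int]: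
--     present = {t for _, _, t in spans}
--     return {k: (1 if TYPE_FOR_FLAG[k] in present else 0) for k in FLAG_ORDER}
-- ===== Notes on version B (the rewrite author's own statement) =====
-- stated objective: alternative
-- what changed: Instead of looping over spans mutating a flag dict via an if/elif chain, B collects the set of span types present in one pass and then builds the result by a fixed-length pass over the flag table, setting each flag by membership.
import Mathlib
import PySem

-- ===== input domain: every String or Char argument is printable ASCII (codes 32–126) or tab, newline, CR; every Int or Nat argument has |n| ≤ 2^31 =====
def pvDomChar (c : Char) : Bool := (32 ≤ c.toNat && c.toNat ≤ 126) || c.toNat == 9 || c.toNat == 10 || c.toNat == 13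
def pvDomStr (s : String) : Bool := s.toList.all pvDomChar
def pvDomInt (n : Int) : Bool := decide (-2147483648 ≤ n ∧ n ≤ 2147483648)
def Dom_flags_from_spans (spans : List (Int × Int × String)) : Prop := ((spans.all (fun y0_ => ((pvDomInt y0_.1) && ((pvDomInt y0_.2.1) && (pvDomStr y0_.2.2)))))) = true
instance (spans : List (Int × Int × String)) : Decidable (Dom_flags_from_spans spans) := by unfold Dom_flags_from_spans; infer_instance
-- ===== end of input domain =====

-- B replaces A's per-span if/elif flag mutation by building the set of span types once
-- and mapping the fixed flag table through a membership test (alternative decomposition).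

-- ===== PORT A =====
def pvFlagOrder : List String := ["has_email", "has_card", "has_phone", "has_iban", "has_jwt", "has_api"]

def pvStepA (d : PySem.Dict String Int) (s : Int × Int × String) : PySem.Dict String Int :=
  let t := s.2.2
  if t = "email" then d.insert "has_email" 1
  else if t = "credit_card" then d.insert "has_card" 1
  else if t = "phone" then d.insert "has_phone" 1
  else if t = "iban" then d.insert "has_iban" 1
  else if t = "jwt" then d.insert "has_jwt" 1
  else if t = "api_key" then d.insert "has_api" 1
  else d

def flags_from_spans (spans : List (Int × Int × String)) : List (String × Int) :=
  let f : PySem.Dict String Int := pvFlagOrder.foldl (fun d k => d.insert k 0) PySem.Dict.empty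
  (spans.foldl pvStepA f).items

-- ===== PORT B =====
def pvFlagTable : List (String × String) :=
  [("has_email", "email"), ("has_card", "credit_card"), ("has_phone", "phone"),
   ("has_iban", "iban"), ("has_jwt", "jwt"), ("has_api", "api_key")]

def flags_from_spans_alt (spans : List (Int × Int × String)) : List (String × Int) :=
  let present : PySem.Set String := PySem.Set.ofList (spans.map (fun s => s.2.2))
  pvFlagTable.map (fun kt => (kt.1, if kt.2 ∈ present then (1 : Int) else 0))

-- ===== PRECONDITION & SPEC =====
def Spec_flags_from_spans (spans : List (Int × Int × String)) (out : List (String × Int)) : Prop := out = flags_from_spans_alt spans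
instance (spans : List (Int × Int × String)) (out : List (String × Int)) : Decidable (Spec_flags_from_spans spans out) := by unfold Spec_flags_from_spans; infer_instance

-- ===== CLAIM (what is proved, stated in full; the proofs are below) =====
def Claim_equal_flags_from_spans : Prop := ∀ (spans : List (Int × Int × String)), Dom_flags_from_spans spans → Spec_flags_from_spans spans (flags_from_spans spans)

-- ===== LEMMAS AND PROOFS =====

-- A's loop over spans, started from the six flag keys holding any values, ends with each
-- value overwritten to 1 exactly when its span type occurs among the spans' types.
theorem pvLoopA (l : List (Int × Int × String)) (v1 v2 v3 v4 v5 v6 : Int) :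
    (l.foldl pvStepA ⟨[("has_email", v1), ("has_card", v2), ("has_phone", v3),
                       ("has_iban", v4), ("has_jwt", v5), ("has_api", v6)]⟩).items
    = [("has_email", if "email"       ∈ l.map (fun s => s.2.2) then 1 else v1),
       ("has_card",  if "credit_card" ∈ l.map (fun s => s.2.2) then 1 else v2),
       ("has_phone", if "phone"       ∈ l.map (fun s => s.2.2) then 1 else v3),
       ("has_iban",  if "iban"        ∈ l.map (fun s => s.2.2) then 1 else v4),
       ("has_jwt",   if "jwt"         ∈ l.map (fun s => s.2.2) then 1 else v5),
       ("has_api",   if "api_key"     ∈ l.map (fun s => s.2.2) then 1 else v6)] := by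
  induction l generalizing v1 v2 v3 v4 v5 v6 with
  | nil => simp
  | cons s rest ih =>
    obtain ⟨a, b, t⟩ := s
    simp only [List.foldl_cons, pvStepA]
    by_cases h1 : t = "email"
    · subst h1
      rw [if_pos rfl, show (PySem.Dict.insert ⟨[("has_email", v1), ("has_card", v2), ("has_phone", v3), ("has_iban", v4), ("has_jwt", v5), ("has_api", v6)]⟩ "has_email" (1:Int)) = (⟨[("has_email", 1), ("has_card", v2), ("has_phone", v3), ("has_iban", v4), ("has_jwt", v5), ("has_api", v6)]⟩ : PySem.Dict String Int) from rfl, ih]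
      simp only [List.map_cons, List.mem_cons, String.reduceEq, false_or, true_or, if_true, ite_self]
    · rw [if_neg h1]
      by_cases h2 : t = "credit_card"
      · subst h2
        rw [if_pos rfl, show (PySem.Dict.insert ⟨[("has_email", v1), ("has_card", v2), ("has_phone", v3), ("has_iban", v4), ("has_jwt", v5), ("has_api", v6)]⟩ "has_card" (1:Int)) = (⟨[("has_email", v1), ("has_card", 1), ("has_phone", v3), ("has_iban", v4), ("has_jwt", v5), ("has_api", v6)]⟩ : PySem.Dict String Int) from rfl, ih]
        simp only [List.map_cons, List.mem_cons, String.reduceEq, false_or, true_or, if_true, ite_self]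
      · rw [if_neg h2]
        by_cases h3 : t = "phone"
        · subst h3
          rw [if_pos rfl, show (PySem.Dict.insert ⟨[("has_email", v1), ("has_card", v2), ("has_phone", v3), ("has_iban", v4), ("has_jwt", v5), ("has_api", v6)]⟩ "has_phone" (1:Int)) = (⟨[("has_email", v1), ("has_card", v2), ("has_phone", 1), ("has_iban", v4), ("has_jwt", v5), ("has_api", v6)]⟩ : PySem.Dict String Int) from rfl, ih]
          simp only [List.map_cons, List.mem_cons, String.reduceEq, false_or, true_or, if_true, ite_self]
        · rw [if_neg h3]
          by_cases h4 : t = "iban"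
          · subst h4
            rw [if_pos rfl, show (PySem.Dict.insert ⟨[("has_email", v1), ("has_card", v2), ("has_phone", v3), ("has_iban", v4), ("has_jwt", v5), ("has_api", v6)]⟩ "has_iban" (1:Int)) = (⟨[("has_email", v1), ("has_card", v2), ("has_phone", v3), ("has_iban", 1), ("has_jwt", v5), ("has_api", v6)]⟩ : PySem.Dict String Int) from rfl, ih]
            simp only [List.map_cons, List.mem_cons, String.reduceEq, false_or, true_or, if_true, ite_self]
          · rw [if_neg h4]
            by_cases h5 : t = "jwt"
            · subst h5
              rw [if_pos rfl, show (PySem.Dict.insert ⟨[("has_email", v1), ("has_card", v2), ("has_phone", v3), ("has_iban", v4), ("has_jwt", v5), ("has_api", v6)]⟩ "has_jwt" (1:Int)) = (⟨[("has_email", v1), ("has_card", v2), ("has_phone", v3), ("has_iban", v4), ("has_jwt", 1), ("has_api", v6)]⟩ : PySem.Dict String Int) from rfl, ih]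
              simp only [List.map_cons, List.mem_cons, String.reduceEq, false_or, true_or, if_true, ite_self]
            · rw [if_neg h5]
              by_cases h6 : t = "api_key"
              · subst h6
                rw [if_pos rfl, show (PySem.Dict.insert ⟨[("has_email", v1), ("has_card", v2), ("has_phone", v3), ("has_iban", v4), ("has_jwt", v5), ("has_api", v6)]⟩ "has_api" (1:Int)) = (⟨[("has_email", v1), ("has_card", v2), ("has_phone", v3), ("has_iban", v4), ("has_jwt", v5), ("has_api", 1)]⟩ : PySem.Dict String Int) from rfl, ih]
                simp only [List.map_cons, List.mem_cons, String.reduceEq, false_or, true_or, if_true, ite_self]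
              · rw [if_neg h6]
                rw [ih]
                simp only [List.map_cons, List.mem_cons, Ne.symm h1, Ne.symm h2, Ne.symm h3, Ne.symm h4, Ne.symm h5, Ne.symm h6, false_or]

-- ===== VERDICT (by name: the statement is the Claim_ definition above) =====
theorem flags_from_spans_spec : Claim_equal_flags_from_spans := by
  intro spans _
  show _ = _
  unfold flags_from_spans flags_from_spans_alt
  rw [show (pvFlagOrder.foldl (fun d k => d.insert k 0) PySem.Dict.empty : PySem.Dict String Int)
        = ⟨[("has_email", 0), ("has_card", 0), ("has_phone", 0),
            ("has_iban", 0), ("has_jwt", 0), ("has_api", 0)]⟩ from rfl]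
  rw [pvLoopA]
  simp only [pvFlagTable, List.map_cons, List.map_nil, PySem.Set.mem_ofList]
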